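-- pv_equiv track=rewrite | github.com/tomas-sys96/advent-of-code | day_01/common.py | get_digits_on_line
-- ===== SOURCE A (Python) =====
-- digits: dict[str, str] = {
--     "one": "1",
--     "two": "2",
--     "three": "3",
--     "four": "4",
--     "five": "5",
--     "six": "6",
--     "seven": "7",
--     "eight": "8",
--     "nine": "9",
-- }
--
-- def get_digits_on_line(line: str) -> dict[int, str]:
--     """Returns a dictionary with digits and their indices for a given line.
--
--     Args:
--         line: Line to be checked
--
--     Returns:
--         digits_on_line: Dictionary with digits and their indices
--     """
--
--     digits_on_line: dict[int, str] = {}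
--
--     for character_index, character in enumerate(line):
--         if character.isdigit():
--             # Store the detected digits right away
--             digits_on_line[character_index] = character
--         else:
--             # Check if a substring starting at the current index equals to a digit as a word
--             for digit_as_word, digit in digits.items():
--                 if line[character_index : (character_index + len(digit_as_word))] == digit_as_word:
--                     digits_on_line[character_index] = digit
--                     break
--
--     return digits_on_line
-- ===== SOURCE B (Python) =====
-- digits: dict[str, str] = {
--     "one": "1",
--     "two": "2",
--     "three": "3",
--     "four": "4",
--     "five": "5",
--     "six": "6",
--     "seven": "7",
--     "eight": "8",
--     "nine": "9",
-- }
--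
-- def get_digits_on_line(line: str) -> dict[int, str]:
--     """Pattern-major rewrite: collect digit characters in one enumerate pass,
--     then locate every (possibly overlapping) spelled-out digit with str.find,
--     and assemble the dictionary in index order."""
--     found: dict[int, str] = {}
--     for index, character in enumerate(line):
--         if character.isdigit():
--             found[index] = character
--     for word, digit in digits.items():
--         start = 0
--         while True:
--             start = line.find(word, start)
--             if start == -1:
--                 break
--             found[start] = digit
--             start += 1
--     return dict(sorted(found.items(), key=lambda item: item[0]))
-- ===== Notes on version B (the rewrite author's own statement) =====
-- stated objective: faster
-- what changed: Replaces the position-major scan (at every index, compare a slice against each of the nine words) by a pattern-major search: one enumerate pass records digit characters, then each word is located with repeated str.find advanced by 1 to catch overlaps, and the dict is assembled in index order at the end.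
import Mathlib
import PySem

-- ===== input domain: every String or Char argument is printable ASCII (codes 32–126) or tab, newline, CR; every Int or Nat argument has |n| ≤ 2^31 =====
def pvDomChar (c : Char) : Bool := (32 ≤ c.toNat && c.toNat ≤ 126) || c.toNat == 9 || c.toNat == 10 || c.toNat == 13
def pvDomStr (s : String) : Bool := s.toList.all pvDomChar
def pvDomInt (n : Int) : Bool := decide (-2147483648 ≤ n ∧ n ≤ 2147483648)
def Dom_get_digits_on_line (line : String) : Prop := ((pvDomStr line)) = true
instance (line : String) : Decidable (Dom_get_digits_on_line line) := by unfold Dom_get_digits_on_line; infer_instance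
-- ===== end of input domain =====

-- B replaces A's position-major scan (slice-compare all nine words at every index) by a
-- pattern-major search: repeated str.find per word plus a final sort of the matches
-- (measured faster in a timing run: C-level find scans instead of per-index slice compares).

-- ===== PORT A =====
-- the module-level `digits` dict, shared by both programs
def pvDigits : List (List Char × String) :=
  [(['o','n','e'], "1"), (['t','w','o'], "2"), (['t','h','r','e','e'], "3"), (['f','o','u','r'], "4"),
   (['f','i','v','e'], "5"), (['s','i','x'], "6"), (['s','e','v','e','n'], "7"),
   (['e','i','g','h','t'], "8"), (['n','i','n','e'], "9")]

-- A's inner `for digit_as_word, digit in digits.items(): if line[i:i+len(w)] == w: …; break`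
def pvTryWords (s : List Char) (i : Int) :
    List (List Char × String) → PySem.Dict Int String → PySem.Dict Int String
  | [], d => d
  | (w, dg) :: rest, d =>
      if PySem.List.slice s (some i) (some (i + (w.length : Int))) = w then d.insert i dg
      else pvTryWords s i rest d

def get_digits_on_line (line : String) : List (Int × String) :=
  ((PySem.List.enumerate line.toList 0).foldl
      (fun d p => if PySem.Str.isdigit p.2 then d.insert p.1 (String.singleton p.2)
                  else pvTryWords line.toList p.1 pvDigits d)
      PySem.Dict.empty).items

-- ===== PORT B =====
-- B's `while True: start = line.find(word, start); if start == -1: break; found[start] = digit; start += 1`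
-- (the fuel argument only makes the loop total; it is started with enough fuel for every iteration)
def pvFindLoop (s w : List Char) (dg : String) :
    Nat → Nat → PySem.Dict Int String → PySem.Dict Int String
  | 0, _, d => d
  | fuel + 1, start, d =>
      let r := PySem.Chars.findFrom s w (start : Int) none
      if r = -1 then d
      else pvFindLoop s w dg fuel (r.toNat + 1) (d.insert r dg)

def get_digits_on_line_alt (line : String) : List (Int × String) :=
  let s := line.toList
  let d1 := (PySem.List.enumerate s 0).foldl
      (fun d p => if PySem.Str.isdigit p.2 then d.insert p.1 (String.singleton p.2) else d)
      PySem.Dict.empty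
  let d2 := pvDigits.foldl (fun d wd => pvFindLoop s wd.1 wd.2 (s.length + 1) 0 d) d1
  (PySem.Dict.ofList (PySem.List.sorted d2.items (fun p => p.1))).items

-- ===== PRECONDITION & SPEC =====
def Spec_get_digits_on_line (line : String) (out : List (Int × String)) : Prop := out = get_digits_on_line_alt line
instance (line : String) (out : List (Int × String)) : Decidable (Spec_get_digits_on_line line out) := by unfold Spec_get_digits_on_line; infer_instance

-- ===== CLAIM (what is proved, stated in full; the proofs are below) =====
def Claim_equal_get_digits_on_line : Prop := ∀ (line : String), Dom_get_digits_on_line line → Spec_get_digits_on_line line (get_digits_on_line line)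

-- ===== LEMMAS AND PROOFS =====

-- the value both programs record at position k (first matching word, A's dict order)
def pvFirstWord (s : List Char) (k : Nat) : List (List Char × String) → Option String
  | [] => none
  | (w, dg) :: rest => if w <+: s.drop k then some dg else pvFirstWord s k rest

def pvVal (s : List Char) (k : Nat) : Option String :=
  if h : k < s.length then
    (if PySem.Str.isdigit s[k] then some (String.singleton s[k]) else pvFirstWord s k pvDigits)
  else none

def pvTarget (s : List Char) : List (Int × String) :=
  (List.range s.length).filterMap fun k => (pvVal s k).map fun v => ((k : Int), v)

-- all positions ≥ start where w occurs in s, in increasing order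
def pvOccs (s w : List Char) (start : Nat) : List Nat :=
  (List.range' start (s.length - start)).filter fun k => decide (w <+: s.drop k)

def pvWordPairs (s : List Char) : List (Int × String) :=
  pvDigits.flatMap fun wd => (pvOccs s wd.1 0).map fun (k : Nat) => ((k : Int), wd.2)

-- B's first pass, written as the list it produces
def pvDigitPairs (s : List Char) : List (Int × String) :=
  ((PySem.List.enumerate s 0).filter (fun p => PySem.Str.isdigit p.2)).map
    (fun p => (p.1, String.singleton p.2))

-- ---- facts about the nine words, by computation ----
lemma pvWords_nonnil : ∀ wd ∈ pvDigits, wd.1 ≠ [] := by decide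

lemma pvWords_head_not_digit : ∀ wd ∈ pvDigits, PySem.Str.isdigit (wd.1.headD 'x') = false := by decide

lemma pvDigits_nodup : pvDigits.Nodup := by decide

lemma pvWords_prefix_eq : ∀ wd ∈ pvDigits, ∀ wd' ∈ pvDigits, wd.1 <+: wd'.1 → wd = wd' := by decide

lemma pvWords_unique {s : List Char} {k : Nat} {wd wd' : List Char × String}
    (h1 : wd ∈ pvDigits) (h2 : wd' ∈ pvDigits)
    (hp : wd.1 <+: s.drop k) (hp' : wd'.1 <+: s.drop k) : wd = wd' := by
  rcases List.prefix_or_prefix_of_prefix hp hp' with h | h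
  · exact pvWords_prefix_eq _ h1 _ h2 h
  · exact (pvWords_prefix_eq _ h2 _ h1 h).symm

-- a word occurrence determines the character at that position
lemma pvOcc_head {s w : List Char} {k : Nat} (hw : w ≠ []) (hp : w <+: s.drop k) :
    k < s.length ∧ s[k]? = some (w.headD 'x') := by
  obtain ⟨c, w', rfl⟩ := List.exists_cons_of_ne_nil hw
  obtain ⟨t, ht⟩ := hp
  have hk : k < s.length := by
    have := congrArg List.length ht
    simp [List.length_drop] at this
    omega
  have h0 : s[k]? = (List.drop k s)[0]? := by
    simp [List.getElem?_drop]
  rw [← ht] at h0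
  exact ⟨hk, by rw [h0]; simp⟩

-- ---- A's inner loop = pvFirstWord ----
lemma pvSlice_eq_iff (s w : List Char) (k : Nat) :
    (PySem.List.slice s (some (k : Int)) (some ((k : Int) + (w.length : Int))) = w) ↔ w <+: s.drop k := by
  rw [PySem.List.slice_natCast_add]
  constructor
  · intro h; rw [← h]; exact List.take_prefix _ _
  · intro h; exact (List.prefix_iff_eq_take.mp h).symm

lemma pvTryWords_eq (s : List Char) (k : Nat) (L : List (List Char × String)) (d : PySem.Dict Int String) :
    pvTryWords s (k : Int) L d =
      match pvFirstWord s k L with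
      | none => d
      | some dg => d.insert (k : Int) dg := by
  induction L with
  | nil => rfl
  | cons wd rest ih =>
    obtain ⟨w, dg⟩ := wd
    by_cases h : w <+: s.drop k
    · have hs := (pvSlice_eq_iff s w k).mpr h
      simp [pvTryWords, pvFirstWord, hs, h]
    · have hs : ¬ (PySem.List.slice s (some (k : Int)) (some ((k : Int) + (w.length : Int))) = w) :=
        fun hc => h ((pvSlice_eq_iff s w k).mp hc)
      simp only [pvTryWords, pvFirstWord, if_neg hs, if_neg h]
      exact ih

-- ---- A = pvTarget ----
lemma pvA_loop (s : List Char) : ∀ (t : List Char) (j : Nat) (d : PySem.Dict Int String),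
    s.drop j = t → (∀ i ∈ d.keys, i < (j : Int)) →
    ((PySem.List.enumerate t (j : Int)).foldl
        (fun d p => if PySem.Str.isdigit p.2 then d.insert p.1 (String.singleton p.2)
                    else pvTryWords s p.1 pvDigits d) d).items
      = d.items ++ (List.range' j (s.length - j)).filterMap (fun k => (pvVal s k).map fun v => ((k : Int), v)) := by
  intro t
  induction t with
  | nil =>
    intro j d hdrop _
    have hlen : s.length ≤ j := List.drop_eq_nil_iff.mp hdrop
    simp [PySem.List.enumerate_nil, Nat.sub_eq_zero_of_le hlen]
  | cons a t' ih =>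
    intro j d hdrop hlt
    have hj : j < s.length := by
      have := congrArg List.length hdrop
      simp [List.length_drop] at this
      omega
    have hsj : s[j]? = some a := by
      have h0 : s[j]? = (List.drop j s)[0]? := by simp [List.getElem?_drop]
      rw [hdrop] at h0
      simpa using h0
    have hsa : s[j] = a := by
      have h1 := List.getElem?_eq_getElem hj
      rw [hsj] at h1
      exact (Option.some.inj h1).symm
    have hdrop' : s.drop (j + 1) = t' := by
      have h1 := congrArg (List.drop 1) hdrop
      rw [List.drop_drop] at h1
      simpa using h1
    have hcj : d.contains ((j : Nat) : Int) = false := by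
      rw [Bool.eq_false_iff]
      intro hc
      have hmem := (PySem.Dict.contains_iff_mem_keys d _).mp hc
      exact absurd (hlt _ hmem) (lt_irrefl _)
    have hcast : ((j : Nat) : Int) + 1 = (((j + 1 : Nat)) : Int) := by push_cast; ring
    have hrange : List.range' j (s.length - j) = j :: List.range' (j + 1) (s.length - (j + 1)) := by
      rw [show s.length - j = (s.length - (j + 1)) + 1 by omega, List.range'_succ]
    simp only [PySem.List.enumerate_cons, List.foldl_cons]
    by_cases hdig : PySem.Str.isdigit a = true
    · have hval : pvVal s j = some (String.singleton a) := by simp [pvVal, hj, hsa, hdig]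
      rw [if_pos hdig, hcast,
        ih (j + 1) (d.insert ((j : Nat) : Int) (String.singleton a)) hdrop' ?hlt']
      case hlt' =>
        intro i hi
        rcases (PySem.Dict.mem_keys_insert _ _ _ _).mp hi with rfl | hi'
        · push_cast; omega
        · have := hlt i hi'
          push_cast at this ⊢
          omega
      rw [PySem.Dict.items_insert_of_not_contains d _ hcj, hrange, List.filterMap_cons]
      simp [hval, List.append_assoc]
    · rw [if_neg hdig, pvTryWords_eq s j]
      have hval : pvVal s j = pvFirstWord s j pvDigits := by simp [pvVal, hj, hsa, hdig]
      cases hfw : pvFirstWord s j pvDigits with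
      | none =>
        rw [hcast, ih (j + 1) d hdrop' (fun i hi => lt_trans (hlt i hi) (by push_cast; omega))]
        rw [hrange, List.filterMap_cons]
        simp [hval, hfw]
      | some dg =>
        rw [hcast, ih (j + 1) (d.insert ((j : Nat) : Int) dg) hdrop' ?hlt2']
        case hlt2' =>
          intro i hi
          rcases (PySem.Dict.mem_keys_insert _ _ _ _).mp hi with rfl | hi'
          · push_cast; omega
          · have := hlt i hi'
            push_cast at this ⊢
            omega
        rw [PySem.Dict.items_insert_of_not_contains d _ hcj, hrange, List.filterMap_cons]
        simp [hval, hfw, List.append_assoc]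

lemma pvEmpty_items : (PySem.Dict.empty : PySem.Dict Int String).items = [] := rfl

lemma pvA_eq (line : String) : get_digits_on_line line = pvTarget line.toList := by
  unfold get_digits_on_line pvTarget
  have h := pvA_loop line.toList line.toList 0 PySem.Dict.empty (by simp)
    (by simp [PySem.Dict.keys_empty])
  rw [Nat.cast_zero] at h
  rw [h, pvEmpty_items, List.range_eq_range']
  simp

-- ---- B: phase 1 ----
lemma pvEnumFilter_fst_nodup (s : List Char) :
    (((PySem.List.enumerate s 0).filter (fun p => PySem.Str.isdigit p.2)).map
      (fun p : Int × Char => p.1)).Nodup := by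
  have hall : ((PySem.List.enumerate s 0).map (fun p : Int × Char => p.1)).Pairwise (· < ·) :=
    (List.pairwise_map).mpr ((PySem.List.pairwise_lt_enumerate s 0).imp (fun h => h))
  have hsub : (((PySem.List.enumerate s 0).filter (fun p => PySem.Str.isdigit p.2)).map
      (fun p : Int × Char => p.1)).Sublist ((PySem.List.enumerate s 0).map (fun p : Int × Char => p.1)) :=
    List.filter_sublist.map _
  exact (hall.imp ne_of_lt).sublist hsub

lemma pvD1_items (s : List Char) :
    ((PySem.List.enumerate s 0).foldl
        (fun d p => if PySem.Str.isdigit p.2 then d.insert p.1 (String.singleton p.2) else d)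
        (PySem.Dict.empty : PySem.Dict Int String)).items = pvDigitPairs s := by
  rw [PySem.List.foldl_if_eq_foldl_filter (p := fun p : Int × Char => PySem.Str.isdigit p.2)
    (f := fun (d : PySem.Dict Int String) (p : Int × Char) => d.insert p.1 (String.singleton p.2))]
  rw [PySem.Dict.items_foldl_insert_fresh _ (fun p : Int × Char => p.1)
    (fun p : Int × Char => String.singleton p.2) _ (fun a _ => PySem.Dict.contains_empty _)
    (pvEnumFilter_fst_nodup s)]
  simp [pvDigitPairs, pvEmpty_items]

-- ---- B: the find loop collects exactly pvOccs ----
lemma pvOccs_nil {s w : List Char} {start : Nat} (h : ¬ w <:+: s.drop start) :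
    pvOccs s w start = [] := by
  unfold pvOccs
  rw [List.filter_eq_nil_iff]
  intro k hk
  simp only [decide_eq_true_eq]
  intro hpref
  apply h
  have hks : start ≤ k := (List.mem_range'_1.mp hk).1
  have hdd : List.drop k s = List.drop (k - start) (List.drop start s) := by
    rw [List.drop_drop]
    congr 1
    omega
  rw [hdd] at hpref
  exact hpref.isInfix.trans (List.drop_suffix _ _).isInfix

lemma pvOccs_cons {s w : List Char} {start m : Nat} (hm : start ≤ m) (hlt : m < s.length)
    (hpref : w <+: s.drop m) (hmin : ∀ i, start ≤ i → i < m → ¬ w <+: s.drop i) :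
    pvOccs s w start = m :: pvOccs s w (m + 1) := by
  unfold pvOccs
  have h1 : start + 1 * (m - start) = m := by omega
  have h2 : (m - start) + (s.length - m) = s.length - start := by omega
  have hsplit := List.range'_append (s := start) (m := m - start) (n := s.length - m) (step := 1)
  rw [h1, h2] at hsplit
  rw [← hsplit, List.filter_append]
  have hfirst : (List.range' start (m - start)).filter (fun k => decide (w <+: s.drop k)) = [] := by
    rw [List.filter_eq_nil_iff]
    intro k hk
    have hk' := List.mem_range'_1.mp hk
    simp only [decide_eq_true_eq]
    exact hmin k hk'.1 (by omega)
  rw [hfirst, show s.length - m = (s.length - (m + 1)) + 1 by omega, List.range'_succ,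
    List.filter_cons]
  simp [hpref]

lemma pvMem_occs {s w : List Char} {start k : Nat} :
    k ∈ pvOccs s w start ↔ start ≤ k ∧ k < s.length ∧ w <+: s.drop k := by
  unfold pvOccs
  rw [List.mem_filter, List.mem_range'_1]
  simp only [decide_eq_true_eq]
  constructor
  · rintro ⟨⟨h1, h2⟩, h3⟩
    exact ⟨h1, by omega, h3⟩
  · rintro ⟨h1, h2, h3⟩
    exact ⟨⟨h1, by omega⟩, h3⟩

lemma pvFindLoop_items (s w : List Char) (dg : String) (hw : w ≠ []) :
    ∀ fuel start (d : PySem.Dict Int String),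
      start ≤ s.length → s.length + 1 - start ≤ fuel →
      (∀ k ∈ pvOccs s w start, d.contains (k : Int) = false) →
      (pvFindLoop s w dg fuel start d).items
        = d.items ++ (pvOccs s w start).map (fun (k : Nat) => ((k : Int), dg)) := by
  intro fuel
  induction fuel with
  | zero => intro start d h1 h2 _; omega
  | succ fuel ih =>
    intro start d hstart hfuel hfresh
    by_cases hr : PySem.Chars.findFrom s w (start : Int) none = -1
    · have hocc : pvOccs s w start = [] :=
        pvOccs_nil ((PySem.Chars.findFrom_natCast_eq_neg_one_iff s w start hstart).mp hr)
      simp [pvFindLoop, hr, hocc]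
    · obtain ⟨hge, hpref, hmin⟩ := PySem.Chars.findFrom_natCast_spec s w start hstart hr
      have hr0 : (0 : Int) ≤ PySem.Chars.findFrom s w (start : Int) none :=
        le_trans (by exact_mod_cast Nat.zero_le start) hge
      set m := (PySem.Chars.findFrom s w (start : Int) none).toNat with hmdef
      have hrm : PySem.Chars.findFrom s w (start : Int) none = (m : Int) :=
        (Int.toNat_of_nonneg hr0).symm
      have hsm : start ≤ m := by
        have := hge
        rw [hrm] at this
        exact_mod_cast this
      have hmlt : m < s.length := by
        by_contra hc
        have hnil : s.drop m = [] := List.drop_eq_nil_iff.mpr (by omega)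
        rw [hnil] at hpref
        exact hw (List.prefix_nil.mp hpref)
      have hcons : pvOccs s w start = m :: pvOccs s w (m + 1) :=
        pvOccs_cons hsm hmlt hpref hmin
      have hmocc : m ∈ pvOccs s w start := by
        rw [hcons]; exact List.mem_cons_self
      have hcm : d.contains ((m : Nat) : Int) = false := hfresh m hmocc
      have hfresh' : ∀ k ∈ pvOccs s w (m + 1),
          (d.insert (PySem.Chars.findFrom s w (start : Int) none) dg).contains ((k : Nat) : Int) = false := by
        intro k hk
        have hk' : k ∈ pvOccs s w start := by
          rw [hcons]; exact List.mem_cons_of_mem _ hk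
        have hkm : m + 1 ≤ k := (pvMem_occs.mp hk).1
        rw [hrm, PySem.Dict.contains_insert]
        have hne : ((k : Int) == (m : Int)) = false :=
          beq_eq_false_iff_ne.mpr (by exact_mod_cast (by omega : k ≠ m))
        rw [hne, hfresh k hk']
        rfl
      simp only [pvFindLoop, if_neg hr]
      rw [ih (m + 1) (d.insert (PySem.Chars.findFrom s w (start : Int) none) dg)
        (by omega) (by omega) hfresh']
      rw [hrm, PySem.Dict.items_insert_of_not_contains d _ hcm, hcons]
      simp [List.append_assoc]

-- ---- B: the word phase appends pvWordPairs ----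
lemma pvB_loop (s : List Char) : ∀ (L : List (List Char × String)), L.Sublist pvDigits →
    ∀ (d : PySem.Dict Int String),
      (∀ wd ∈ L, ∀ k ∈ pvOccs s wd.1 0, d.contains (k : Int) = false) →
      (L.foldl (fun d wd => pvFindLoop s wd.1 wd.2 (s.length + 1) 0 d) d).items
        = d.items ++ L.flatMap (fun wd => (pvOccs s wd.1 0).map fun (k : Nat) => ((k : Int), wd.2)) := by
  intro L
  induction L with
  | nil => intro _ d _; simp
  | cons wd L' ih =>
    intro hsub d hfresh
    have hwd : wd ∈ pvDigits := hsub.subset List.mem_cons_self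
    have hsub' : L'.Sublist pvDigits := (List.sublist_cons_self wd L').trans hsub
    have hnd : wd ∉ L' := (List.nodup_cons.mp (hsub.nodup pvDigits_nodup)).1
    rw [List.foldl_cons]
    have hitems : (pvFindLoop s wd.1 wd.2 (s.length + 1) 0 d).items
        = d.items ++ (pvOccs s wd.1 0).map (fun (k : Nat) => ((k : Int), wd.2)) :=
      pvFindLoop_items s wd.1 wd.2 (pvWords_nonnil wd hwd) (s.length + 1) 0 d
        (Nat.zero_le _) (by omega) (hfresh wd List.mem_cons_self)
    have hfresh' : ∀ wd' ∈ L', ∀ k ∈ pvOccs s wd'.1 0,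
        (pvFindLoop s wd.1 wd.2 (s.length + 1) 0 d).contains ((k : Nat) : Int) = false := by
      intro wd' hm' k hk
      rw [Bool.eq_false_iff]
      intro hc
      have hkmem := (PySem.Dict.contains_iff_mem_keys _ _).mp hc
      simp only [PySem.Dict.keys, hitems, List.map_append, List.mem_append, List.map_map] at hkmem
      rcases hkmem with hkd | hkw
      · have : d.contains ((k : Nat) : Int) = true := by
          apply (PySem.Dict.contains_iff_mem_keys _ _).mpr
          simpa only [PySem.Dict.keys] using hkd
        rw [hfresh wd' (List.mem_cons_of_mem _ hm') k hk] at this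
        exact Bool.false_ne_true this
      · obtain ⟨j, hj, hjk⟩ := List.mem_map.mp hkw
        have hjeq : j = k := by simpa using hjk
        rw [hjeq] at hj
        have hpw : wd.1 <+: s.drop k := (pvMem_occs.mp hj).2.2
        have hpw' : wd'.1 <+: s.drop k := (pvMem_occs.mp hk).2.2
        have : wd = wd' := pvWords_unique hwd (hsub'.subset hm') hpw hpw'
        exact hnd (this ▸ hm')
    rw [ih hsub' (pvFindLoop s wd.1 wd.2 (s.length + 1) 0 d) hfresh', hitems, List.flatMap_cons]
    simp [List.append_assoc]

-- ---- membership characterisations ----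
lemma pvFirstWord_eq_of_mem {s : List Char} {k : Nat} :
    ∀ L, (∀ x ∈ L, x ∈ pvDigits) → ∀ wd ∈ L, wd.1 <+: s.drop k → pvFirstWord s k L = some wd.2 := by
  intro L
  induction L with
  | nil => intro _ wd h; simp at h
  | cons w0 L' ih =>
    intro hmem wd hwd hpref
    obtain ⟨w0w, w0d⟩ := w0
    rcases List.mem_cons.mp hwd with heq | hwd'
    · subst heq
      simp [pvFirstWord, hpref]
    · by_cases h0 : w0w <+: s.drop k
      · have heq : ((w0w, w0d) : List Char × String) = wd :=
          pvWords_unique (hmem _ List.mem_cons_self) (hmem wd hwd) h0 hpref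
        simp [pvFirstWord, h0, ← heq]
      · simp only [pvFirstWord, if_neg h0]
        exact ih (fun x hx => hmem x (List.mem_cons_of_mem _ hx)) wd hwd' hpref

lemma pvFirstWord_some {s : List Char} {k : Nat} {v : String} :
    ∀ L, pvFirstWord s k L = some v → ∃ wd ∈ L, wd.1 <+: s.drop k ∧ v = wd.2 := by
  intro L
  induction L with
  | nil => intro h; simp [pvFirstWord] at h
  | cons w0 L' ih =>
    obtain ⟨w0w, w0d⟩ := w0
    intro h
    by_cases h0 : w0w <+: s.drop k
    · simp only [pvFirstWord, if_pos h0, Option.some_inj] at h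
      exact ⟨(w0w, w0d), List.mem_cons_self, h0, h.symm⟩
    · simp only [pvFirstWord, if_neg h0] at h
      obtain ⟨wd, hm, hp, hv⟩ := ih h
      exact ⟨wd, List.mem_cons_of_mem _ hm, hp, hv⟩

lemma pvTarget_mem {s : List Char} {i : Int} {v : String} :
    (i, v) ∈ pvTarget s ↔ ∃ k : Nat, k < s.length ∧ i = (k : Int) ∧ pvVal s k = some v := by
  unfold pvTarget
  rw [List.mem_filterMap]
  constructor
  · rintro ⟨k, hk, hf⟩
    cases hval : pvVal s k with
    | none => rw [hval] at hf; simp at hf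
    | some v' =>
      rw [hval] at hf
      simp only [Option.map_some, Option.some_inj, Prod.mk.injEq] at hf
      exact ⟨k, List.mem_range.mp hk, hf.1.symm, by rw [hval, hf.2]⟩
  · rintro ⟨k, hk, rfl, hval⟩
    exact ⟨k, List.mem_range.mpr hk, by simp [hval]⟩

-- the item list of B's dict before sorting holds exactly the pairs of pvTarget
lemma pvD2_mem {s : List Char} {i : Int} {v : String} :
    (i, v) ∈ pvDigitPairs s ++ pvWordPairs s ↔ (i, v) ∈ pvTarget s := by
  rw [List.mem_append, pvTarget_mem]
  constructor
  · rintro (hd | hw)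
    · obtain ⟨p, hp, hpe⟩ := List.mem_map.mp hd
      obtain ⟨hpen, hpdig⟩ := List.mem_filter.mp hp
      obtain ⟨k, hk, rfl⟩ := (PySem.List.mem_enumerate_iff s 0 p).mp hpen
      have hpd : PySem.Str.isdigit s[k] = true := by simpa using hpdig
      simp only [Prod.mk.injEq] at hpe
      refine ⟨k, hk, by omega, ?_⟩
      simp only [pvVal, dif_pos hk, if_pos hpd]
      rw [hpe.2]
    · obtain ⟨wd, hwd, hin⟩ := List.mem_flatMap.mp hw
      obtain ⟨k, hk, hke⟩ := List.mem_map.mp hin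
      obtain ⟨_, hklt, hpref⟩ := pvMem_occs.mp hk
      simp only [Prod.mk.injEq] at hke
      refine ⟨k, hklt, hke.1.symm, ?_⟩
      obtain ⟨_, hhead⟩ := pvOcc_head (pvWords_nonnil wd hwd) hpref
      have hsk : s[k] = wd.1.headD 'x' :=
        Option.some.inj ((List.getElem?_eq_getElem hklt).symm.trans hhead)
      have hfd : PySem.Str.isdigit s[k] = false := by
        rw [hsk]; exact pvWords_head_not_digit wd hwd
      simp only [pvVal, dif_pos hklt, hfd, Bool.false_eq_true, if_false]
      rw [pvFirstWord_eq_of_mem pvDigits (fun x hx => hx) wd hwd hpref, hke.2]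
  · rintro ⟨k, hk, rfl, hval⟩
    simp only [pvVal, dif_pos hk] at hval
    by_cases hdig : PySem.Str.isdigit s[k] = true
    · left
      rw [if_pos hdig] at hval
      have hv := Option.some.inj hval
      apply List.mem_map.mpr
      refine ⟨((0 : Int) + (k : Int), s[k]),
        List.mem_filter.mpr ⟨(PySem.List.mem_enumerate_iff s 0 _).mpr ⟨k, hk, rfl⟩,
          by simpa using hdig⟩, ?_⟩
      simp [hv]
    · right
      rw [if_neg hdig] at hval
      obtain ⟨wd, hwd, hpref, hveq⟩ := pvFirstWord_some pvDigits hval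
      exact List.mem_flatMap.mpr ⟨wd, hwd, List.mem_map.mpr
        ⟨k, pvMem_occs.mpr ⟨Nat.zero_le _, hk, hpref⟩, by simp [hveq]⟩⟩

lemma pvTarget_pairwise (s : List Char) :
    (pvTarget s).Pairwise (fun p q => p.1 < q.1) := by
  unfold pvTarget
  rw [List.pairwise_filterMap]
  refine (List.pairwise_lt_range).imp ?_
  intro a a' hlt b hb b' hb'
  have hb1 : b.1 = (a : Int) := by
    cases hv : pvVal s a with
    | none => rw [hv] at hb; simp at hb
    | some v => rw [hv] at hb; simp only [Option.map_some, Option.some_inj] at hb; rw [← hb]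
  have hb'1 : b'.1 = (a' : Int) := by
    cases hv : pvVal s a' with
    | none => rw [hv] at hb'; simp at hb'
    | some v => rw [hv] at hb'; simp only [Option.map_some, Option.some_inj] at hb'; rw [← hb']
  rw [hb1, hb'1]
  exact_mod_cast hlt

lemma pvTarget_nodup (s : List Char) : (pvTarget s).Nodup :=
  (pvTarget_pairwise s).imp fun h => by rintro rfl; exact lt_irrefl _ h

lemma pvTarget_fst_nodup (s : List Char) : ((pvTarget s).map (fun p => p.1)).Nodup :=
  ((List.pairwise_map).mpr ((pvTarget_pairwise s).imp (fun h => h))).imp ne_of_lt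

-- keys of B's unsorted dict are distinct
lemma pvD2_keys_nodup (s : List Char) :
    ((pvDigitPairs s ++ pvWordPairs s).map (fun p : Int × String => p.1)).Nodup := by
  rw [List.map_append, List.nodup_append]
  refine ⟨?_, ?_, ?_⟩
  · unfold pvDigitPairs
    rw [List.map_map]
    exact pvEnumFilter_fst_nodup s
  · unfold pvWordPairs
    simp only [List.map_flatMap, List.map_map]
    rw [List.nodup_flatMap]
    constructor
    · intro wd _
      exact List.Nodup.map (fun a b h => by simpa using h) ((List.nodup_range' 1).filter _)
    · have hpair : pvDigits.Pairwise (fun wd wd' => wd ≠ wd') := pvDigits_nodup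
      refine hpair.imp_of_mem ?_
      intro wd wd' hwd hwd' hne x hx hx'
      obtain ⟨j, hj, hje⟩ := List.mem_map.mp hx
      obtain ⟨j', hj', hje'⟩ := List.mem_map.mp hx'
      have hjj : j' = j := by
        have h1 : ((j : Int)) = x := by simpa using hje
        have h2 : ((j' : Int)) = x := by simpa using hje'
        omega
      rw [hjj] at hj'
      exact hne (pvWords_unique hwd hwd' (pvMem_occs.mp hj).2.2 (pvMem_occs.mp hj').2.2)
  · intro a ha b hb heq
    subst heq
    unfold pvDigitPairs at ha
    rw [List.map_map] at ha
    obtain ⟨p, hp, hpe⟩ := List.mem_map.mp ha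
    obtain ⟨hpen, hpdig⟩ := List.mem_filter.mp hp
    obtain ⟨k, hk, rfl⟩ := (PySem.List.mem_enumerate_iff s 0 p).mp hpen
    have hpd : PySem.Str.isdigit s[k] = true := by simpa using hpdig
    unfold pvWordPairs at hb
    simp only [List.map_flatMap, List.map_map] at hb
    obtain ⟨wd, hwd, hbm⟩ := List.mem_flatMap.mp hb
    obtain ⟨j, hj, hje⟩ := List.mem_map.mp hbm
    have hjk : j = k := by
      have h1 : ((j : Int)) = a := by simpa using hje
      have h2 : ((k : Int)) = a := by simpa using hpe
      omega
    rw [hjk] at hj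
    obtain ⟨_, hhead⟩ := pvOcc_head (pvWords_nonnil wd hwd) (pvMem_occs.mp hj).2.2
    have hsk : s[k] = wd.1.headD 'x' :=
      Option.some.inj ((List.getElem?_eq_getElem hk).symm.trans hhead)
    have hfd : PySem.Str.isdigit s[k] = false := by
      rw [hsk]; exact pvWords_head_not_digit wd hwd
    rw [hfd] at hpd
    exact Bool.false_ne_true hpd

lemma pvB_eq (line : String) : get_digits_on_line_alt line = pvTarget line.toList := by
  show (PySem.Dict.ofList (PySem.List.sorted
      ((pvDigits.foldl (fun d wd => pvFindLoop line.toList wd.1 wd.2 (line.toList.length + 1) 0 d)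
        ((PySem.List.enumerate line.toList 0).foldl
          (fun d p => if PySem.Str.isdigit p.2 then d.insert p.1 (String.singleton p.2) else d)
          PySem.Dict.empty)).items) (fun p => p.1))).items = pvTarget line.toList
  set s := line.toList with hs
  set d1 := (PySem.List.enumerate s 0).foldl
      (fun d p => if PySem.Str.isdigit p.2 then d.insert p.1 (String.singleton p.2) else d)
      (PySem.Dict.empty : PySem.Dict Int String) with hd1def
  have hd1 : d1.items = pvDigitPairs s := pvD1_items s
  have hd1fresh : ∀ wd ∈ pvDigits, ∀ k ∈ pvOccs s wd.1 0, d1.contains ((k : Nat) : Int) = false := by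
    intro wd hwd k hk
    rw [Bool.eq_false_iff]
    intro hc
    have hkmem := (PySem.Dict.contains_iff_mem_keys _ _).mp hc
    simp only [PySem.Dict.keys, hd1] at hkmem
    unfold pvDigitPairs at hkmem
    rw [List.map_map] at hkmem
    obtain ⟨p, hp, hpe⟩ := List.mem_map.mp hkmem
    obtain ⟨hpen, hpdig⟩ := List.mem_filter.mp hp
    obtain ⟨k', hk', rfl⟩ := (PySem.List.mem_enumerate_iff s 0 p).mp hpen
    have hkk : k' = k := by
      have : ((0 : Int) + (k' : Int)) = (k : Int) := by simpa using hpe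
      omega
    subst hkk
    obtain ⟨_, hhead⟩ := pvOcc_head (pvWords_nonnil wd hwd) (pvMem_occs.mp hk).2.2
    rw [List.getElem?_eq_getElem hk'] at hhead
    have hfd : PySem.Str.isdigit s[k'] = false := by
      rw [show s[k'] = wd.1.headD 'x' from by simpa using hhead]
      exact pvWords_head_not_digit wd hwd
    simp only at hpdig
    rw [hfd] at hpdig
    exact Bool.false_ne_true hpdig
  have hd2 : (pvDigits.foldl (fun d wd => pvFindLoop s wd.1 wd.2 (s.length + 1) 0 d) d1).items
      = pvDigitPairs s ++ pvWordPairs s := by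
    rw [pvB_loop s pvDigits (List.Sublist.refl _) d1 hd1fresh, hd1]
    rfl
  rw [hd2]
  have hnd2 : (pvDigitPairs s ++ pvWordPairs s).Nodup := (pvD2_keys_nodup s).of_map _
  have hperm : (pvTarget s).Perm (pvDigitPairs s ++ pvWordPairs s) := by
    rw [List.perm_ext_iff_of_nodup (pvTarget_nodup s) hnd2]
    rintro ⟨i, v⟩
    exact pvD2_mem.symm
  rw [PySem.List.sorted_eq_of_perm_of_pairwise_lt _ _ _ hperm (pvTarget_pairwise s)]
  show (List.foldl (fun acc p => acc.insert p.1 p.2) (PySem.Dict.empty : PySem.Dict Int String)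
      (pvTarget s)).items = pvTarget s
  rw [PySem.Dict.items_foldl_insert_fresh (pvTarget s) (fun p : Int × String => p.1)
    (fun p : Int × String => p.2) PySem.Dict.empty (fun a _ => PySem.Dict.contains_empty _)
    (pvTarget_fst_nodup s)]
  simp [pvEmpty_items]

-- ===== VERDICT (by name: the statement is the Claim_ definition above) =====
theorem get_digits_on_line_spec : Claim_equal_get_digits_on_line := by
  intro line _
  unfold Spec_get_digits_on_line
  rw [pvA_eq, pvB_eq]
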